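-- pv_equiv track=rewrite | github.com/Headendarr/Headendarr | backend/vod.py | _merge_strip_rules_for_source_categories
-- ===== SOURCE A (Python) =====
-- def _merge_strip_rules_for_source_categories(
--     source_category_ids: list[int], strip_rules: dict[int, tuple[list[str], list[str]]]
-- ) -> tuple[list[str], list[str]]:
--     merged_prefixes: list[str] = []
--     merged_suffixes: list[str] = []
--     seen_prefixes: set[str] = set()
--     seen_suffixes: set[str] = set()
--
--     for source_category_id in source_category_ids or []:
--         prefixes, suffixes = strip_rules.get(int(source_category_id), ([], []))
--         for token in prefixes:
--             token_key = str(token)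
--             if token_key in seen_prefixes:
--                 continue
--             seen_prefixes.add(token_key)
--             merged_prefixes.append(token)
--         for token in suffixes:
--             token_key = str(token)
--             if token_key in seen_suffixes:
--                 continue
--             seen_suffixes.add(token_key)
--             merged_suffixes.append(token)
--
--     return merged_prefixes, merged_suffixes
-- ===== SOURCE B (Python) =====
-- def _dedup(tokens):
--     out = {}
--     for t in tokens:
--         out.setdefault(str(t), t)
--     return list(out.values())
--
--
-- def _merge_strip_rules_for_source_categories(
--     source_category_ids: list[int], strip_rules: dict[int, tuple[list[str], list[str]]]
-- ) -> tuple[list[str], list[str]]: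
--     all_prefixes: list[str] = []
--     all_suffixes: list[str] = []
--     for source_category_id in source_category_ids or []:
--         prefixes, suffixes = strip_rules.get(int(source_category_id), ([], []))
--         all_prefixes.extend(prefixes)
--         all_suffixes.extend(suffixes)
--     return _dedup(all_prefixes), _dedup(all_suffixes)
-- ===== Notes on version B (the rewrite author's own statement) =====
-- stated objective: simpler
-- what changed: Replaced the interleaved four-accumulator single pass (two merged lists plus two seen-sets maintained per category) by a two-phase collect-then-dedup: one loop flattens all prefixes/suffixes into two lists, then a small helper dedups each with an order-preserving dict via setdefault.
import Mathlib
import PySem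

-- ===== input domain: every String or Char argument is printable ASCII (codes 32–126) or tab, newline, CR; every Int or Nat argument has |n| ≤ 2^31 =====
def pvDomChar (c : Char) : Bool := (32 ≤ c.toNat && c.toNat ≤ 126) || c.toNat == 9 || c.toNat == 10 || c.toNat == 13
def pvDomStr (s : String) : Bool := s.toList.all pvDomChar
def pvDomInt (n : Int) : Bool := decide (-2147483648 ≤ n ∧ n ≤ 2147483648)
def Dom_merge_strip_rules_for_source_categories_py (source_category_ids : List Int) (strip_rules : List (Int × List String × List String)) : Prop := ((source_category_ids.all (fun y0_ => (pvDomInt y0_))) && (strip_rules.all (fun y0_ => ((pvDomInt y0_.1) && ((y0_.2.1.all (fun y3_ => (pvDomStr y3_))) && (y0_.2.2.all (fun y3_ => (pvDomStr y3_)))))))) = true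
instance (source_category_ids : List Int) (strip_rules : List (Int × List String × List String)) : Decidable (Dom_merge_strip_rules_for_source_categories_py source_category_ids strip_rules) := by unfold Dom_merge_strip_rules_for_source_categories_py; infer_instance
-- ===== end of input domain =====

-- B replaces A's interleaved single pass with four accumulators by a two-phase
-- collect-then-dedup (flatten both token streams, then dedup each via an ordered
-- dict keyed on str(token)); same result, simpler decomposition.


-- ===== PORT A =====
-- A's inner token loop: skip a token whose key (str(token) = token on strings) was
-- seen, else record it in the seen set and append it to the merged list.
def msrSeenLoop (st : List String × PySem.Set String) (tokens : List String) :
    List String × PySem.Set String :=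
  tokens.foldl (fun st token =>
    if PySem.Set.contains st.2 token then st
    else (st.1 ++ [token], PySem.Set.add st.2 token)) st

def merge_strip_rules_for_source_categories_py (source_category_ids : List Int) (strip_rules : List (Int × List String × List String)) : List String × List String :=
  -- state = (merged_prefixes, merged_suffixes, seen_prefixes, seen_suffixes);
  -- int(source_category_id) is the identity on Int; 'ids or []' iterates ids.
  let st := source_category_ids.foldl (fun st source_category_id =>
      let pr := (PySem.Dict.mk strip_rules).getD source_category_id ([], [])
      let p := msrSeenLoop (st.1, st.2.2.1) pr.1
      let s := msrSeenLoop (st.2.1, st.2.2.2) pr.2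
      (p.1, s.1, p.2, s.2))
    ([], [], PySem.Set.empty, PySem.Set.empty)
  (st.1, st.2.1)

-- ===== PORT B =====
-- B's helper: order-preserving dedup via a dict built with setdefault (key = str(t) = t).
def msrDedup (tokens : List String) : List String :=
  (tokens.foldl (fun out t => PySem.Dict.setdefault out t t) PySem.Dict.empty).values

def merge_strip_rules_for_source_categories_py_alt (source_category_ids : List Int) (strip_rules : List (Int × List String × List String)) : List String × List String :=
  let acc := source_category_ids.foldl (fun acc source_category_id =>
      let pr := (PySem.Dict.mk strip_rules).getD source_category_id ([], [])
      (acc.1 ++ pr.1, acc.2 ++ pr.2)) ([], [])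
  (msrDedup acc.1, msrDedup acc.2)

-- ===== PRECONDITION & SPEC =====
def Spec_merge_strip_rules_for_source_categories_py (source_category_ids : List Int) (strip_rules : List (Int × List String × List String)) (out : List String × List String) : Prop := out = merge_strip_rules_for_source_categories_py_alt source_category_ids strip_rules
instance (source_category_ids : List Int) (strip_rules : List (Int × List String × List String)) (out : List String × List String) : Decidable (Spec_merge_strip_rules_for_source_categories_py source_category_ids strip_rules out) := by unfold Spec_merge_strip_rules_for_source_categories_py; infer_instance

-- ===== CLAIM (what is proved, stated in full; the proofs are below) =====
def Claim_equal_merge_strip_rules_for_source_categories_py : Prop := ∀ (source_category_ids : List Int) (strip_rules : List (Int × List String × List String)), Dom_merge_strip_rules_for_source_categories_py source_category_ids strip_rules → Spec_merge_strip_rules_for_source_categories_py source_category_ids strip_rules (merge_strip_rules_for_source_categories_py source_category_ids strip_rules)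

-- ===== LEMMAS AND PROOFS =====

-- One step of A's inner loop on a state whose merged list equals its seen set
-- is exactly Set.add on both components.
lemma msrSeenLoop_diag (tokens : List String) (s : PySem.Set String) :
    msrSeenLoop (s, s) tokens = (PySem.Set.update s tokens, PySem.Set.update s tokens) := by
  induction tokens generalizing s with
  | nil => rfl
  | cons t ts ih =>
      show msrSeenLoop _ _ = _
      unfold msrSeenLoop
      simp only [List.foldl_cons]
      have hstep : (if PySem.Set.contains s t then (s, s)
          else (s ++ [t], PySem.Set.add s t)) = (PySem.Set.add s t, PySem.Set.add s t) := by
        simp only [PySem.Set.add]; split <;> simp_all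
      rw [hstep]
      have := ih (PySem.Set.add s t)
      unfold msrSeenLoop at this
      simpa [PySem.Set.update] using this

-- A's outer loop, on a diagonal state, computes two independent Set.update folds.
lemma msrA_fold (ids : List Int) (rules : List (Int × List String × List String))
    (sp ss : PySem.Set String) :
    ids.foldl (fun st source_category_id =>
      let pr := (PySem.Dict.mk rules).getD source_category_id ([], [])
      let p := msrSeenLoop (st.1, st.2.2.1) pr.1
      let s := msrSeenLoop (st.2.1, st.2.2.2) pr.2
      (p.1, s.1, p.2, s.2)) (sp, ss, sp, ss)
    = (PySem.Set.update sp (ids.flatMap fun i => ((PySem.Dict.mk rules).getD i ([], [])).1),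
       PySem.Set.update ss (ids.flatMap fun i => ((PySem.Dict.mk rules).getD i ([], [])).2),
       PySem.Set.update sp (ids.flatMap fun i => ((PySem.Dict.mk rules).getD i ([], [])).1),
       PySem.Set.update ss (ids.flatMap fun i => ((PySem.Dict.mk rules).getD i ([], [])).2)) := by
  induction ids generalizing sp ss with
  | nil => rfl
  | cons i is ih =>
      simp only [List.foldl_cons, List.flatMap_cons]
      rw [msrSeenLoop_diag, msrSeenLoop_diag]
      simp only []
      rw [ih]
      simp [PySem.Set.update, List.foldl_append]

-- B's dedup fold on a dict whose items are (x, x) for a set S produces the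
-- items of Set.update S tokens, paired diagonally.
lemma msrDedup_fold (tokens : List String) (S : PySem.Set String) :
    (tokens.foldl (fun out t => PySem.Dict.setdefault out t t)
      (PySem.Dict.mk (S.map (fun x => (x, x))))).items
    = (PySem.Set.update S tokens).map (fun x => (x, x)) := by
  induction tokens generalizing S with
  | nil => rfl
  | cons t ts ih =>
      simp only [List.foldl_cons]
      have hc : (PySem.Dict.mk (S.map (fun x => (x, x)))).contains t = PySem.Set.contains S t := by
        have hfun : (fun x : String => x == t) = (fun x : String => t == x) := by
          funext x; by_cases h : x = t <;> simp [h, Ne.symm]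
        simp only [PySem.Dict.contains, List.any_map, Function.comp_def,
          PySem.Set.contains, List.contains_eq_any_beq, hfun]
      have hstep : PySem.Dict.setdefault (PySem.Dict.mk (S.map (fun x => (x, x)))) t t
          = PySem.Dict.mk ((PySem.Set.add S t).map (fun x => (x, x))) := by
        simp only [PySem.Dict.setdefault, hc, PySem.Set.add]
        split <;> simp
      rw [hstep, ih]
      simp [PySem.Set.update]

lemma msrDedup_eq_ofList (tokens : List String) :
    msrDedup tokens = PySem.Set.ofList tokens := by
  unfold msrDedup
  have h := msrDedup_fold tokens PySem.Set.empty
  simp only [PySem.Set.empty, List.map_nil] at h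
  have : (PySem.Dict.mk ([] : List (String × String))) = PySem.Dict.empty := rfl
  rw [this] at h
  simp [PySem.Dict.values, h, PySem.Set.ofList, PySem.Set.update, PySem.Set.empty,
    Function.comp_def]

-- B's collecting loop is the flatMap of the two projections.
lemma msrB_collect (ids : List Int) (rules : List (Int × List String × List String)) :
    ids.foldl (fun acc source_category_id =>
      let pr := (PySem.Dict.mk rules).getD source_category_id ([], [])
      (acc.1 ++ pr.1, acc.2 ++ pr.2)) (([], []) : List String × List String)
    = (ids.flatMap fun i => ((PySem.Dict.mk rules).getD i ([], [])).1,
       ids.flatMap fun i => ((PySem.Dict.mk rules).getD i ([], [])).2) := by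
  rw [PySem.List.foldl_prod_mk
    (f := fun acc e => acc ++ ((PySem.Dict.mk rules).getD e ([], [])).1)
    (g := fun acc e => acc ++ ((PySem.Dict.mk rules).getD e ([], [])).2)]
  rw [PySem.List.foldl_append_eq_flatMap, PySem.List.foldl_append_eq_flatMap]
  simp

-- ===== VERDICT (by name: the statement is the Claim_ definition above) =====
theorem merge_strip_rules_for_source_categories_py_spec : Claim_equal_merge_strip_rules_for_source_categories_py := by
  intro ids rules _
  unfold Spec_merge_strip_rules_for_source_categories_py
  unfold merge_strip_rules_for_source_categories_py merge_strip_rules_for_source_categories_py_alt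
  simp only []
  rw [msrB_collect]
  have hA := msrA_fold ids rules PySem.Set.empty PySem.Set.empty
  simp only [PySem.Set.empty] at hA ⊢
  rw [hA]
  simp [msrDedup_eq_ofList, PySem.Set.ofList, PySem.Set.update]
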